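-- pv_equiv track=rewrite | github.com/eibakke/hass_scripts | cheapest_non_sequential.py | generatePossibleSchedules
-- ===== SOURCE A (Python) =====
-- def minimumHoursToCoverTimespans(timespans, max_gap):
--   return len(timespans)//(max_gap+1)
--
-- def generatePossibleSchedules(sequences, max_gap):
--   min_hrs = minimumHoursToCoverTimespans(sequences, max_gap)
--   if min_hrs == 0:
--     return []
--   possible_schedules = []
--   if min_hrs == 1:
--     min_index = (len(sequences)-1) - max_gap
--     max_index = max_gap+1
--     for t in sequences[min_index:max_index]:
--       possible_schedules.append([t])
--     return possible_schedules
--   for i in range(max_gap+1):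
--     rest = sequences[i+1:]
--     if minimumHoursToCoverTimespans(rest, max_gap) <= (min_hrs-1):
--       for p in generatePossibleSchedules(sequences[i+1:], max_gap):
--         possible_schedules.append([sequences[i]] + p)
--   return possible_schedules
-- ===== SOURCE B (Python) =====
-- def generatePossibleSchedules(sequences, max_gap):
--     n = len(sequences)
--     min_hrs = n // (max_gap + 1)
--     if min_hrs <= 0:
--         return []
--     if min_hrs == 1:
--         return [[t] for t in sequences[n - 1 - max_gap: max_gap + 1]]
--     # Bottom-up DP over suffix lengths: tbl[d] = schedules covering the suffix that
--     # starts at index n - d; each needed suffix subproblem is computed exactly once.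
--     # Only suffixes whose length has residue (mod max_gap+1) at least n's residue can
--     # ever be recursed into, so the others are skipped.
--     r0 = n % (max_gap + 1)
--     tbl = []
--     for m in range(n + 1):
--         j = n - m
--         h = m // (max_gap + 1)
--         if m % (max_gap + 1) < r0 or h <= 0:
--             cur = []
--         elif h == 1:
--             cur = [[t] for t in sequences[j + (m - 1 - max_gap): j + max_gap + 1]]
--         else:
--             cur = []
--             for i in range(max_gap + 1):
--                 if (m - i - 1) // (max_gap + 1) <= h - 1:
--                     for p in tbl[m - 1 - i]:
--                         cur.append([sequences[j + i]] + p)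
--         tbl.append(cur)
--     return tbl[n]
-- ===== Notes on version B (the rewrite author's own statement) =====
-- stated objective: alternative
-- what changed: Replaces A's top-down recursion that recomputes suffix schedule lists along every recursion path (on freshly sliced lists) by a bottom-up dynamic-programming table indexed by suffix length, computing each reachable suffix subproblem exactly once (reachability characterised by the suffix length's residue mod max_gap+1).
import Mathlib
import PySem

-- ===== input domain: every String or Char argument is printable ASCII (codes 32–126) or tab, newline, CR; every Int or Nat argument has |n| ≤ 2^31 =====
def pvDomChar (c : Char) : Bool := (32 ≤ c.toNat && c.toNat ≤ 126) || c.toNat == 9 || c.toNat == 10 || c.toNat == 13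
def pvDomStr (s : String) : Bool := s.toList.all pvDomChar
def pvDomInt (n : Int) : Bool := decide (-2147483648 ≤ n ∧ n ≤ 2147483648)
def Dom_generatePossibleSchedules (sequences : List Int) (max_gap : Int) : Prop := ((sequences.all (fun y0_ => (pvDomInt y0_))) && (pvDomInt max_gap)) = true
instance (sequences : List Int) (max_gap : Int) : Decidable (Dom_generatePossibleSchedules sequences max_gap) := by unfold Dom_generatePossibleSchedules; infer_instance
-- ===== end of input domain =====

-- B replaces A's top-down recursion on list slices by a bottom-up DP table over suffix
-- lengths, computing each reachable suffix subproblem exactly once (objective: alternative).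

-- ===== PORT A =====
def minimumHoursToCoverTimespans (timespans : List Int) (max_gap : Int) : Int :=
  PySem.Int.floordiv (timespans.length : Int) (max_gap + 1)

-- fuel makes A's recursion on slices structurally total; sequences.length + 1 always suffices
def genAfuel : Nat → List Int → Int → List (List Int)
  | 0, _, _ => []
  | fuel + 1, sequences, max_gap =>
    let min_hrs := minimumHoursToCoverTimespans sequences max_gap
    if min_hrs = 0 then []
    else if min_hrs = 1 then
      let min_index : Int := ((sequences.length : Int) - 1) - max_gap
      let max_index : Int := max_gap + 1
      (PySem.List.slice sequences (some min_index) (some max_index)).foldl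
        (fun acc t => acc ++ [[t]]) []
    else
      (PySem.List.pyRange 0 (max_gap + 1) 1).foldl
        (fun acc i =>
          let rest := PySem.List.slice sequences (some (i + 1)) none
          if minimumHoursToCoverTimespans rest max_gap ≤ min_hrs - 1 then
            acc ++ (genAfuel fuel (PySem.List.slice sequences (some (i + 1)) none) max_gap).map
              (fun p => PySem.List.pyGetD sequences i 0 :: p)
          else acc) []

def generatePossibleSchedules (sequences : List Int) (max_gap : Int) : List (List Int) :=
  genAfuel (sequences.length + 1) sequences max_gap

-- ===== PORT B =====
def stepC (sequences : List Int) (max_gap : Int) (r0 : Int) (tbl : List (List (List Int))) (m : Nat) : List (List Int) :=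
  let j : Int := (sequences.length : Int) - (m : Int)
  let h := PySem.Int.floordiv (m : Int) (max_gap + 1)
  if PySem.Int.mod (m : Int) (max_gap + 1) < r0 ∨ h ≤ 0 then []
  else if h = 1 then
    (PySem.List.slice sequences (some (j + ((m : Int) - 1 - max_gap))) (some (j + max_gap + 1))).map
      (fun t => [t])
  else
    (PySem.List.pyRange 0 (max_gap + 1) 1).foldl
      (fun cur i =>
        if PySem.Int.floordiv ((m : Int) - i - 1) (max_gap + 1) ≤ h - 1 then
          cur ++ (PySem.List.pyGetD tbl ((m : Int) - 1 - i) []).map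
            (fun p => PySem.List.pyGetD sequences (j + i) 0 :: p)
        else cur) []

def generatePossibleSchedules_alt (sequences : List Int) (max_gap : Int) : List (List Int) :=
  let n := sequences.length
  let min_hrs := PySem.Int.floordiv (n : Int) (max_gap + 1)
  if min_hrs ≤ 0 then []
  else if min_hrs = 1 then
    (PySem.List.slice sequences (some ((n : Int) - 1 - max_gap)) (some (max_gap + 1))).map
      (fun t => [t])
  else
    let r0 := PySem.Int.mod (n : Int) (max_gap + 1)
    let tbl := (List.range (n + 1)).foldl (fun tbl m => tbl ++ [stepC sequences max_gap r0 tbl m]) []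
    PySem.List.pyGetD tbl (n : Int) []

-- ===== PRECONDITION & SPEC =====
-- Pre_ excludes exactly max_gap = -1, on which A raises ZeroDivisionError (len // 0).
def Pre_generatePossibleSchedules (sequences : List Int) (max_gap : Int) : Prop := max_gap ≠ -1
instance (sequences : List Int) (max_gap : Int) : Decidable (Pre_generatePossibleSchedules sequences max_gap) := by unfold Pre_generatePossibleSchedules; infer_instance
def pvWitness_generatePossibleSchedules : List Int × Int := ([3, 4, 5], 1)

def Spec_generatePossibleSchedules (sequences : List Int) (max_gap : Int) (out : List (List Int)) : Prop := out = generatePossibleSchedules_alt sequences max_gap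
instance (sequences : List Int) (max_gap : Int) (out : List (List Int)) : Decidable (Spec_generatePossibleSchedules sequences max_gap out) := by unfold Spec_generatePossibleSchedules; infer_instance

-- ===== CLAIM (what is proved, stated in full; the proofs are below) =====
def Claim_equal_generatePossibleSchedules : Prop := ∀ (sequences : List Int) (max_gap : Int), Dom_generatePossibleSchedules sequences max_gap → Pre_generatePossibleSchedules sequences max_gap → Spec_generatePossibleSchedules sequences max_gap (generatePossibleSchedules sequences max_gap)

-- ===== LEMMAS AND PROOFS =====
theorem genAfuel_fuel_irrel (g : Int) : ∀ (f1 : Nat), ∀ (f2 : Nat) (xs : List Int),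
    xs.length < f1 → xs.length < f2 → genAfuel f1 xs g = genAfuel f2 xs g := by
  intro f1
  induction f1 with
  | zero => intro f2 xs h1; omega
  | succ l ih =>
    intro f2 xs h1 h2
    obtain ⟨m, rfl⟩ : ∃ m, f2 = m + 1 := ⟨f2 - 1, by omega⟩
    simp only [genAfuel]
    split_ifs with h0 h1'
    · rfl
    · rfl
    · -- recursive branch; xs ≠ []
      have hxs : xs.length ≠ 0 := by
        intro hc
        apply h0
        simp only [minimumHoursToCoverTimespans, hc]
        norm_num [PySem.Int.floordiv, Int.zero_fdiv]
      apply PySem.List.foldl_congr_mem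
      intro acc i hi
      rw [PySem.List.mem_pyRange_one] at hi
      have hi0 : 0 ≤ i := hi.1
      have hslice : PySem.List.slice xs (some (i + 1)) none = xs.drop (i+1).toNat :=
        PySem.List.slice_from xs (by omega)
      have hlen : (xs.drop (i+1).toNat).length < l ∧ (xs.drop (i+1).toNat).length < m := by
        simp only [List.length_drop]; omega
      simp only [hslice, ih m (xs.drop (i+1).toNat) hlen.1 hlen.2]



-- residue arithmetic: a recursion step keeps the suffix-length residue (mod max_gap+1) ≥ the parent's
theorem resid_step (G m I K : Nat) (hI : I < G + 1) (hIm : I + 1 ≤ m)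
    (hK : K = m / (G + 1)) (hK2 : 2 ≤ K) (hcond : (m - I - 1) / (G + 1) ≤ K - 1) :
    m % (G + 1) ≤ (m - I - 1) % (G + 1) := by
  set d := G + 1 with hd
  set M := m - I - 1 with hM
  have h1 : d * (m / d) + m % d = m := Nat.div_add_mod m d
  have h3 : m % d < d := Nat.mod_lt _ (by omega)
  have h2 : d * (M / d) + M % d = M := Nat.div_add_mod M d
  have h4 : M % d < d := Nat.mod_lt _ (by omega)
  have h6 : d * (M / d) ≤ d * (K - 1) := Nat.mul_le_mul_left d hcond
  have h7 : d * (K - 1) + d = d * K := by rw [← Nat.mul_succ]; congr 1; omega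
  rw [← hK] at h1
  generalize hA : d * K = A at h1 h7
  generalize hB : d * (M / d) = B at h2 h6
  generalize hC : d * (K - 1) = C at h6 h7
  omega

theorem stepC_eq (xs : List Int) (G : Nat) (m : Nat) (hm : m ≤ xs.length)
    (hres : m % (G + 1) ≥ xs.length % (G + 1)) :
    stepC xs (G : Int) (PySem.Int.mod (xs.length : Int) ((G : Int) + 1))
      ((List.range m).map (fun (d : Nat) =>
        if PySem.Int.mod (xs.length : Int) ((G : Int) + 1) ≤ PySem.Int.mod (d : Int) ((G : Int) + 1)
        then generatePossibleSchedules (xs.drop (xs.length - d)) (G : Int) else [])) m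
      = generatePossibleSchedules (xs.drop (xs.length - m)) (G : Int) := by
  set n := xs.length with hn
  set ys := xs.drop (n - m) with hys
  have hysl : ys.length = m := by simp [hys]; omega
  have hcast : (G : Int) + 1 = ((G + 1 : Nat) : Int) := by push_cast; ring
  have hmodm : PySem.Int.mod (m : Int) ((G : Int) + 1) = ((m % (G + 1) : Nat) : Int) := by
    rw [hcast]; exact_mod_cast PySem.Int.mod_natCast m (G + 1)
  have hmodn : PySem.Int.mod (n : Int) ((G : Int) + 1) = ((n % (G + 1) : Nat) : Int) := by
    rw [hcast]; exact_mod_cast PySem.Int.mod_natCast n (G + 1)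
  have hdiv : PySem.Int.floordiv (m : Int) ((G : Int) + 1) = ((m / (G + 1) : Nat) : Int) := by
    rw [hcast]; exact_mod_cast PySem.Int.floordiv_natCast m (G + 1)
  rw [generatePossibleSchedules,
      genAfuel_fuel_irrel (G : Int) (ys.length + 1) (m + 1) ys (by omega) (by omega)]
  simp only [stepC, genAfuel, hysl]
  set K := m / (G + 1) with hK
  simp only [minimumHoursToCoverTimespans, hysl, hdiv, hmodm, hmodn]
  by_cases hK0 : K = 0
  · rw [if_pos (Or.inr (show ((K : Nat) : Int) ≤ 0 by rw [hK0]; simp)),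
        if_pos (show ((K : Nat) : Int) = 0 by rw [hK0]; simp)]
  · have hKpos : 0 < K := Nat.pos_of_ne_zero hK0
    rw [if_neg (show ¬ (((m % (G + 1) : Nat) : Int) < ((n % (G + 1) : Nat) : Int) ∨ ((K : Nat) : Int) ≤ 0) by
          rintro (hor | hor)
          · exact absurd hor (by exact_mod_cast Nat.not_lt.mpr hres)
          · exact absurd hor (by exact_mod_cast by omega)),
        if_neg (show ¬ ((K : Nat) : Int) = 0 by exact_mod_cast by omega)]
    by_cases hK1 : K = 1
    · -- slice branch
      have hkb1 : G + 1 ≤ m := (Nat.one_le_div_iff (by omega)).mp (by omega)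
      have hkb2 : m < 2 * (G + 1) := by
        have := (Nat.div_lt_iff_lt_mul (show 0 < G + 1 by omega)).mp
          (show m / (G + 1) < 2 by omega)
        omega
      rw [if_pos (show ((K : Nat) : Int) = 1 by rw [hK1]; simp),
          if_pos (show ((K : Nat) : Int) = 1 by rw [hK1]; simp)]
      rw [show (↑xs.length - ↑m + ((m : Int) - 1 - ↑G) : Int) = ((n - 1 - G : Nat) : Int) by omega,
          show (↑xs.length - ↑m + ↑G + 1 : Int) = ((n - m + G + 1 : Nat) : Int) by omega,
          show ((m : Int) - 1 - ↑G) = ((m - 1 - G : Nat) : Int) by omega,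
          show ((↑G : Int) + 1) = ((G + 1 : Nat) : Int) by omega,
          PySem.List.slice_natCast, PySem.List.slice_natCast,
          PySem.List.foldl_append_singleton_eq_map (fun t => [t]), hys, List.drop_drop,
          List.nil_append,
          show n - m + (m - 1 - G) = n - 1 - G by omega,
          show G + 1 - (m - 1 - G) = n - m + G + 1 - (n - 1 - G) by omega]
    · have hK2 : 2 ≤ K := by omega
      rw [if_neg (show ¬ ((K : Nat) : Int) = 1 by exact_mod_cast by omega),
          if_neg (show ¬ ((K : Nat) : Int) = 1 by exact_mod_cast by omega)]
      have hk2 : 2 * (G + 1) ≤ m := (Nat.le_div_iff_mul_le (by omega)).mp hK2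
      apply PySem.List.foldl_congr_mem
      intro acc i hi
      rw [PySem.List.mem_pyRange_one] at hi
      obtain ⟨I, rfl⟩ : ∃ I : Nat, i = (I : Int) := ⟨i.toNat, by omega⟩
      have hIG : I < G + 1 := by exact_mod_cast hi.2
      have hIm : I < m := by omega
      have hdivI : PySem.Int.floordiv ((m - (I + 1) : Nat) : Int) ((G : Int) + 1)
          = ((( m - (I + 1)) / (G + 1) : Nat) : Int) := by
        rw [hcast]; exact_mod_cast PySem.Int.floordiv_natCast (m - (I + 1)) (G + 1)
      rw [show ((I : Int) + 1) = ((I + 1 : Nat) : Int) by omega,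
          PySem.List.slice_from_natCast, hys, List.drop_drop,
          show (n - m + (I + 1)) = n - m + 1 + I by omega,
          show (List.drop (n - m + 1 + I) xs).length = m - (I + 1) by simp; omega,
          show ((m : Int) - (I : Int) - 1) = ((m - (I + 1) : Nat) : Int) by omega,
          hdivI,
          show ((m : Int) - 1 - (I : Int)) = ((m - 1 - I : Nat) : Int) by omega,
          PySem.List.pyGetD_natCast (List.map _ (List.range m)) (m - 1 - I),
          show (↑xs.length - ↑m + (I : Int)) = ((n - m + I : Nat) : Int) by omega,
          PySem.List.pyGetD_natCast xs (n - m + I),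
          PySem.List.pyGetD_natCast (List.drop (n - m) xs) I,
          genAfuel_fuel_irrel (G : Int) m ((List.drop (n - m + 1 + I) xs).length + 1)
            (List.drop (n - m + 1 + I) xs) (by simp; omega) (by omega)]
      simp only [List.getD_eq_getElem?_getD, List.getElem?_map, List.getElem?_range,
        show m - 1 - I < m by omega, List.getElem?_drop, generatePossibleSchedules,
        Option.map_some, Option.getD_some]
      by_cases hcond : ((( m - (I + 1)) / (G + 1) : Nat) : Int) ≤ ((K : Nat) : Int) - 1
      · rw [if_pos hcond, if_pos hcond]
        have hcondN : (m - I - 1) / (G + 1) ≤ K - 1 := by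
          rw [Nat.sub_sub]
          have h' : ((K : Nat) : Int) - 1 = ((K - 1 : Nat) : Int) := by omega
          rw [h'] at hcond
          exact_mod_cast hcond
        have hresI : m % (G + 1) ≤ (m - I - 1) % (G + 1) :=
          resid_step G m I K hIG (by omega) hK hK2 hcondN
        have hmodI : PySem.Int.mod ((m - 1 - I : Nat) : Int) ((G : Int) + 1)
            = (((m - 1 - I) % (G + 1) : Nat) : Int) := by
          rw [hcast]; exact_mod_cast PySem.Int.mod_natCast (m - 1 - I) (G + 1)
        rw [hmodI, if_pos (show ((n % (G + 1) : Nat) : Int) ≤ (((m - 1 - I) % (G + 1) : Nat) : Int) by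
              exact_mod_cast by
                have he : m - 1 - I = m - I - 1 := by omega
                rw [he]; omega)]
        rw [show n - (m - 1 - I) = n - m + 1 + I by omega]
      · rw [if_neg hcond, if_neg hcond]

theorem tbl_invariant (xs : List Int) (G : Nat) :
    ∀ (k : Nat), k ≤ xs.length + 1 →
      (List.range k).foldl
          (fun tbl m => tbl ++ [stepC xs (G : Int) (PySem.Int.mod (xs.length : Int) ((G : Int) + 1)) tbl m]) []
        = (List.range k).map (fun (d : Nat) =>
            if PySem.Int.mod (xs.length : Int) ((G : Int) + 1) ≤ PySem.Int.mod (d : Int) ((G : Int) + 1)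
            then generatePossibleSchedules (xs.drop (xs.length - d)) (G : Int) else []) := by
  intro k
  induction k with
  | zero => intro _; simp
  | succ k ih =>
    intro hk1
    rw [List.range_succ, List.foldl_append, List.foldl_cons, List.foldl_nil, ih (by omega),
        List.map_append, List.map_cons, List.map_nil]
    congr 2
    have hcast : (G : Int) + 1 = ((G + 1 : Nat) : Int) := by push_cast; ring
    have hmodk : PySem.Int.mod (k : Int) ((G : Int) + 1) = ((k % (G + 1) : Nat) : Int) := by
      rw [hcast]; exact_mod_cast PySem.Int.mod_natCast k (G + 1)
    have hmodn : PySem.Int.mod (xs.length : Int) ((G : Int) + 1)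
        = ((xs.length % (G + 1) : Nat) : Int) := by
      rw [hcast]; exact_mod_cast PySem.Int.mod_natCast xs.length (G + 1)
    by_cases hres : k % (G + 1) ≥ xs.length % (G + 1)
    · rw [stepC_eq xs G k (by omega) hres, if_pos (by rw [hmodk, hmodn]; exact_mod_cast hres)]
    · rw [if_neg (by rw [hmodk, hmodn]; exact_mod_cast by omega)]
      simp only [stepC, hmodk, hmodn]
      rw [if_pos (Or.inl (by exact_mod_cast by omega))]

-- ===== VERDICT (by name: the statement is the Claim_ definition above) =====
theorem generatePossibleSchedules_spec : Claim_equal_generatePossibleSchedules := by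
  intro xs g _ _
  unfold Spec_generatePossibleSchedules
  simp only [generatePossibleSchedules_alt]
  rcases (by omega : (g + 1) ≤ 0 ∨ 0 < g + 1) with hgneg | hgpos
  · have hle : PySem.Int.floordiv (xs.length : Int) (g + 1) ≤ 0 := by
      rcases eq_or_lt_of_le hgneg with he | hlt
      · rw [he]; simp [PySem.Int.floordiv]
      · exact Int.fdiv_nonpos_of_nonneg_of_nonpos (by omega) (by omega)
    rw [if_pos hle]
    simp only [generatePossibleSchedules, genAfuel, minimumHoursToCoverTimespans]
    by_cases h0 : PySem.Int.floordiv (xs.length : Int) (g + 1) = 0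
    · rw [if_pos h0]
    · rw [if_neg h0, if_neg (by omega), PySem.List.pyRange_one_eq_nil hgneg]
      rfl
  · obtain ⟨G, rfl⟩ : ∃ G : Nat, g = (G : Int) := ⟨g.toNat, by omega⟩
    have hcast : (G : Int) + 1 = ((G + 1 : Nat) : Int) := by push_cast; ring
    have hdiv : PySem.Int.floordiv (xs.length : Int) ((G : Int) + 1)
        = ((xs.length / (G + 1) : Nat) : Int) := by
      rw [hcast]; exact_mod_cast PySem.Int.floordiv_natCast xs.length (G + 1)
    set K := xs.length / (G + 1) with hK
    rw [hdiv]
    by_cases hK0 : K = 0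
    · rw [if_pos (show ((K : Nat) : Int) ≤ 0 by rw [hK0]; simp)]
      simp only [generatePossibleSchedules, genAfuel, minimumHoursToCoverTimespans, hdiv]
      rw [if_pos (show ((K : Nat) : Int) = 0 by rw [hK0]; simp)]
    · have hKpos : 0 < K := Nat.pos_of_ne_zero hK0
      rw [if_neg (show ¬ ((K : Nat) : Int) ≤ 0 by exact_mod_cast by omega)]
      by_cases hK1 : K = 1
      · rw [if_pos (show ((K : Nat) : Int) = 1 by rw [hK1]; simp)]
        simp only [generatePossibleSchedules, genAfuel, minimumHoursToCoverTimespans, hdiv]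
        rw [if_neg (show ¬ ((K : Nat) : Int) = 0 by exact_mod_cast by omega),
            if_pos (show ((K : Nat) : Int) = 1 by rw [hK1]; simp),
            PySem.List.foldl_append_singleton_eq_map (fun t => [t]), List.nil_append]
      · rw [if_neg (show ¬ ((K : Nat) : Int) = 1 by exact_mod_cast by omega),
            tbl_invariant xs G (xs.length + 1) (le_refl _),
            PySem.List.pyGetD_natCast]
        simp only [List.getD_eq_getElem?_getD, List.getElem?_map, List.getElem?_range,
          Nat.lt_succ_self, Option.map_some, Option.getD_some, Nat.sub_self, List.drop_zero,
          le_refl, if_pos]
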